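-- pv_equiv track=rewrite | github.com/aitorquilez/lyzer | research-system/scrapers/search.py | prioritize_urls
-- ===== SOURCE A (Python) =====
-- def prioritize_urls(
--
--     results: list[dict],
--     priority_patterns: list[str],
-- ) -> list[dict]:
--     """
--     Reordena resultados para que los que coincidan con priority_patterns
--     aparezcan primero (en el orden en que aparecen en priority_patterns).
--
--     Args:
--         results:           Resultados de búsqueda.
--         priority_patterns: Substrings de URLs a priorizar.
--                            Ej: ["mai-cdmo.com", "linkedin.com", "datoscif.es"]
--
--     Returns:
--         Lista reordenada. Las URLs sin match van al final.
--     """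
--     tiers: dict[int, list[dict]] = {i: [] for i in range(len(priority_patterns))}
--     rest: list[dict] = []
--
--     for item in results:
--         url = item.get("url", "")
--         matched = False
--         for idx, pattern in enumerate(priority_patterns):
--             if pattern.lower() in url.lower():
--                 tiers[idx].append(item)
--                 matched = True
--                 break
--         if not matched:
--             rest.append(item)
--
--     prioritized: list[dict] = []
--     for idx in range(len(priority_patterns)):
--         prioritized.extend(tiers[idx])
--     prioritized.extend(rest)
--
--     return prioritized
-- ===== SOURCE B (Python) =====
-- def prioritize_urls(
--     results: list[dict],
--     priority_patterns: list[str],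
-- ) -> list[dict]:
--     """Stable sort by the index of the first matching priority pattern
--     (len(priority_patterns) when none matches): matched items come first,
--     tier by tier, original order preserved within each tier."""
--     n = len(priority_patterns)
--
--     def tier(item):
--         url = item.get("url", "").lower()
--         for i, pattern in enumerate(priority_patterns):
--             if pattern.lower() in url:
--                 return i
--         return n
--
--     return sorted(results, key=tier)
-- ===== Notes on version B (the rewrite author's own statement) =====
-- stated objective: simpler
-- what changed: Replaces A's per-index tier dict, matched flag and manual concatenation loops by a single stable sort of the results keyed on the index of the first matching priority pattern (len(priority_patterns) when none matches).
import Mathlib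
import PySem

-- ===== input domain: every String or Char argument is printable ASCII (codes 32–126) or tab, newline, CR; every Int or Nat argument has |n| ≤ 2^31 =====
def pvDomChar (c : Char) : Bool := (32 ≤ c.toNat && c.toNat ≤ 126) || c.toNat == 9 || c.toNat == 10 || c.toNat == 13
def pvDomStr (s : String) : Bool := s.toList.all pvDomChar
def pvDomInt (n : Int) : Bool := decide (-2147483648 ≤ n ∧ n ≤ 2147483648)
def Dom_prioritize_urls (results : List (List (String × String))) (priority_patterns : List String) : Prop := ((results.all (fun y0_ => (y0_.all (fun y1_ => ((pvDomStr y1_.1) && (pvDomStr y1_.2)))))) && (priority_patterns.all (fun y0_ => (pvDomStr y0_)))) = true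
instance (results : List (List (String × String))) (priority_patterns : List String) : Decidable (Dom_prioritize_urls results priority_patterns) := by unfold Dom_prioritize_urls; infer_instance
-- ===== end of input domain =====

-- B replaces A's tier-bucket dict and manual concatenation by one stable sort keyed on the
-- first-matching-pattern index (objective: simpler; not measured faster).

-- ===== PORT A =====
-- inner 'for idx, pattern in enumerate(priority_patterns): if …: …; break' of A:
-- the index of the first pattern whose lowercase form occurs in the lowercase url.
def pvFindTier (idx : Nat) (patterns : List String) (url : String) : Option Nat :=
  match patterns with
  | [] => none
  | p :: ps =>
      if PySem.Str.isIn (PySem.Str.lower p) (PySem.Str.lower url) then some idx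
      else pvFindTier (idx + 1) ps url

def prioritize_urls (results : List (List (String × String))) (priority_patterns : List String) : List (List (String × String)) :=
  -- tiers = {i: [] for i in range(len(priority_patterns))}
  let tiers0 : PySem.Dict Int (List (List (String × String))) :=
    (PySem.List.pyRange 0 (priority_patterns.length : Int) 1).foldl
      (fun d i => d.insert i []) PySem.Dict.empty
  -- for item in results: … (tiers, rest)
  let st := results.foldl
    (fun (s : PySem.Dict Int (List (List (String × String))) × List (List (String × String))) item =>
      let url := (PySem.Dict.mk item).getD "url" ""
      match pvFindTier 0 priority_patterns url with
      | some idx => (s.1.modify (idx : Int) [] (fun l => l ++ [item]), s.2)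
      | none => (s.1, s.2 ++ [item]))
    (tiers0, ([] : List (List (String × String))))
  -- prioritized = []; for idx in range(len(priority_patterns)): prioritized.extend(tiers[idx])
  let prioritized := (PySem.List.pyRange 0 (priority_patterns.length : Int) 1).foldl
    (fun acc i => acc ++ st.1.getD i []) []
  prioritized ++ st.2

-- ===== PORT B =====
-- B's tier(item) loop: index of the first matching pattern, len(priority_patterns) if none.
def pvTier (patterns : List String) (urlLower : String) : Nat :=
  match patterns with
  | [] => 0
  | p :: ps => if PySem.Str.isIn (PySem.Str.lower p) urlLower then 0 else pvTier ps urlLower + 1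

def prioritize_urls_alt (results : List (List (String × String))) (priority_patterns : List String) : List (List (String × String)) :=
  PySem.List.sorted results
    (fun item => pvTier priority_patterns (PySem.Str.lower ((PySem.Dict.mk item).getD "url" ""))) false

-- ===== PRECONDITION & SPEC =====
def Spec_prioritize_urls (results : List (List (String × String))) (priority_patterns : List String) (out : List (List (String × String))) : Prop := out = prioritize_urls_alt results priority_patterns
instance (results : List (List (String × String))) (priority_patterns : List String) (out : List (List (String × String))) : Decidable (Spec_prioritize_urls results priority_patterns out) := by unfold Spec_prioritize_urls; infer_instance

-- ===== CLAIM (what is proved, stated in full; the proofs are below) =====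
def Claim_equal_prioritize_urls : Prop := ∀ (results : List (List (String × String))) (priority_patterns : List String), Dom_prioritize_urls results priority_patterns → Spec_prioritize_urls results priority_patterns (prioritize_urls results priority_patterns)

-- ===== LEMMAS AND PROOFS =====

-- the sort key of B, shared by the proofs
def pvKey (priority_patterns : List String) (item : List (String × String)) : Nat :=
  pvTier priority_patterns (PySem.Str.lower ((PySem.Dict.mk item).getD "url" ""))

theorem pvTier_le (ps : List String) (u : String) : pvTier ps u ≤ ps.length := by
  induction ps with
  | nil => simp [pvTier]
  | cons p ps ih => simp only [pvTier, List.length_cons]; split <;> omega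

theorem pvFindTier_eq (k : Nat) (ps : List String) (url : String) :
    pvFindTier k ps url =
      if pvTier ps (PySem.Str.lower url) < ps.length
      then some (k + pvTier ps (PySem.Str.lower url)) else none := by
  induction ps generalizing k with
  | nil => simp [pvFindTier, pvTier]
  | cons p ps ih =>
      simp only [pvFindTier, pvTier, List.length_cons]
      split
      · simp
      · rw [ih]
        have := pvTier_le ps (PySem.Str.lower url)
        split <;> split <;> first | (simp; omega) | omega | rfl

-- insertBy walks past a prefix it is not 'before'
theorem insertBy_append_not {α : Type} (before : α → α → Bool) (x : α) (l1 l2 : List α)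
    (h : ∀ y ∈ l1, before x y = false) :
    PySem.List.insertBy before x (l1 ++ l2) = l1 ++ PySem.List.insertBy before x l2 := by
  induction l1 with
  | nil => simp
  | cons y ys ih =>
      have hy : before x y = false := h y (by simp)
      simp only [List.cons_append, PySem.List.insertBy, hy]
      simp only [Bool.false_eq_true, if_false]
      exact congrArg (y :: ·) (ih (fun z hz => h z (by simp [hz])))

theorem insertBy_all_before {α : Type} (before : α → α → Bool) (x : α) (l : List α)
    (h : ∀ y ∈ l, before x y = true) :
    PySem.List.insertBy before x l = x :: l := by
  cases l with
  | nil => rfl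
  | cons y ys => simp [PySem.List.insertBy, h y (by simp)]

-- buckets whose index is not key x ignore the appended x
theorem flatMap_filter_drop {α : Type} (key : α → Nat) (x : α) (ys : List α) (L : List Nat)
    (hx : ∀ i ∈ L, key x ≠ i) :
    L.flatMap (fun i => (ys ++ [x]).filter (fun z => key z == i))
    = L.flatMap (fun i => ys.filter (fun z => key z == i)) := by
  induction L with
  | nil => simp
  | cons i L ih =>
      simp only [List.flatMap_cons]
      rw [ih (fun j hj => hx j (by simp [hj])), List.filter_append]
      have : (([x]).filter (fun z => key z == i)) = [] := by
        simp [hx i (by simp)]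
      simp [this]

-- one stable insertion into the bucket concatenation appends to the bucket of its key
theorem insertBy_buckets {α : Type} (key : α → Nat) (n : Nat) (x : α) (ys : List α)
    (hx : key x ≤ n) :
    PySem.List.insertBy (fun a b => decide (key a < key b)) x
      ((List.range (n + 1)).flatMap (fun i => ys.filter (fun z => key z == i)))
    = (List.range (n + 1)).flatMap (fun i => (ys ++ [x]).filter (fun z => key z == i)) := by
  have hsplit : List.range (n + 1)
      = List.range (key x) ++ (key x :: (List.range (n - key x)).map (fun j => key x + (j + 1))) := by
    have h1 : n + 1 = key x + (n + 1 - key x) := by omega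
    rw [h1, List.range_add]
    have h2 : n + 1 - key x = (n - key x) + 1 := by omega
    rw [h2, List.range_succ_eq_map]
    simp [Function.comp_def, Nat.succ_eq_add_one]
  rw [hsplit]
  simp only [List.flatMap_append, List.flatMap_cons]
  rw [← List.append_assoc]
  rw [insertBy_append_not _ x _ _ (by
    intro y hy
    rcases List.mem_append.1 hy with hy | hy
    · rcases List.mem_flatMap.1 hy with ⟨i, hi, hyf⟩
      have hik : i < key x := List.mem_range.1 hi
      have := (List.mem_filter.1 hyf).2
      simp only [beq_iff_eq] at this
      simp only [decide_eq_false_iff_not]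
      omega
    · have := (List.mem_filter.1 hy).2
      simp only [beq_iff_eq] at this
      simp only [decide_eq_false_iff_not]
      omega)]
  rw [insertBy_all_before _ x _ (by
    intro y hy
    rcases List.mem_flatMap.1 hy with ⟨i, hi, hyf⟩
    rcases List.mem_map.1 hi with ⟨j, _, rfl⟩
    have := (List.mem_filter.1 hyf).2
    simp only [beq_iff_eq] at this
    simp only [decide_eq_true_eq]
    omega)]
  rw [flatMap_filter_drop key x ys _ (by intro i hi; have := List.mem_range.1 hi; omega)]
  rw [flatMap_filter_drop key x ys _ (by
    intro i hi
    rcases List.mem_map.1 hi with ⟨j, _, rfl⟩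
    omega)]
  simp [List.filter_append, List.append_assoc]

-- folding stable insertion over xs extends the buckets of ys to those of ys ++ xs
theorem foldl_insertBy_buckets {α : Type} (key : α → Nat) (n : Nat) (xs ys : List α)
    (h : ∀ x ∈ xs, key x ≤ n) :
    xs.foldl (fun acc x => PySem.List.insertBy (fun a b => decide (key a < key b)) x acc)
      ((List.range (n + 1)).flatMap (fun i => ys.filter (fun z => key z == i)))
    = (List.range (n + 1)).flatMap (fun i => (ys ++ xs).filter (fun z => key z == i)) := by
  induction xs generalizing ys with
  | nil => simp
  | cons x xs ih =>
      simp only [List.foldl_cons]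
      rw [insertBy_buckets key n x ys (h x (by simp))]
      rw [ih (ys ++ [x]) (fun z hz => h z (by simp [hz]))]
      simp

-- B's sort is the bucket concatenation
theorem sorted_eq_buckets {α : Type} (key : α → Nat) (n : Nat) (xs : List α)
    (h : ∀ x ∈ xs, key x ≤ n) :
    PySem.List.sorted xs key false
    = (List.range (n + 1)).flatMap (fun i => xs.filter (fun z => key z == i)) := by
  have h0 : ((List.range (n + 1)).flatMap
      (fun i => ([] : List α).filter (fun z => key z == i))) = [] := by simp
  rw [PySem.List.sorted_eq_foldl_insertBy]
  have := foldl_insertBy_buckets key n xs [] h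
  rw [h0] at this
  simpa using this

-- A's main loop splits into its dict component and its rest component
theorem loop_split (pats : List String) (results : List (List (String × String)))
    (d : PySem.Dict Int (List (List (String × String)))) (r : List (List (String × String))) :
    results.foldl
      (fun (s : PySem.Dict Int (List (List (String × String))) × List (List (String × String))) item =>
        match pvFindTier 0 pats ((PySem.Dict.mk item).getD "url" "") with
        | some idx => (s.1.modify (idx : Int) [] (fun l => l ++ [item]), s.2)
        | none => (s.1, s.2 ++ [item])) (d, r)
    = (results.foldl
        (fun d item =>
          match pvFindTier 0 pats ((PySem.Dict.mk item).getD "url" "") with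
          | some idx => d.modify (idx : Int) [] (fun l => l ++ [item])
          | none => d) d,
       r ++ results.filter
         (fun item => (pvFindTier 0 pats ((PySem.Dict.mk item).getD "url" "")).isNone)) := by
  induction results generalizing d r with
  | nil => simp
  | cons item rest ih =>
      simp only [List.foldl_cons, List.filter_cons]
      cases h : pvFindTier 0 pats ((PySem.Dict.mk item).getD "url" "") with
      | some idx => simp [ih]
      | none => simp [ih]

-- the conditional dict fold is the unconditional fold over the matched (index, item) pairs
theorem foldl_cond_modify (pats : List String) (results : List (List (String × String)))
    (d : PySem.Dict Int (List (List (String × String)))) :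
    results.foldl
      (fun d item =>
        match pvFindTier 0 pats ((PySem.Dict.mk item).getD "url" "") with
        | some idx => d.modify (idx : Int) [] (fun l => l ++ [item])
        | none => d) d
    = (results.filterMap
        (fun item => (pvFindTier 0 pats ((PySem.Dict.mk item).getD "url" "")).map
          (fun idx => (Int.ofNat idx, item)))).foldl
        (fun d p => d.modify p.1 [] (fun l => l ++ [p.2])) d := by
  induction results generalizing d with
  | nil => rfl
  | cons item rest ih =>
      simp only [List.foldl_cons, List.filterMap_cons]
      cases h : pvFindTier 0 pats ((PySem.Dict.mk item).getD "url" "") with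
      | some idx => simp [ih]
      | none => simp [ih]

-- the initial tiers dict maps every key to [] under getD _ []
theorem getD_init (L : List Int) (d : PySem.Dict Int (List (List (String × String))))
    (h : ∀ c, d.getD c [] = []) (c : Int) :
    (L.foldl (fun d i => d.insert i []) d).getD c [] = [] := by
  induction L generalizing d with
  | nil => exact h c
  | cons i L ih =>
      simp only [List.foldl_cons]
      exact ih _ (fun c' => by rw [PySem.Dict.getD_insert]; split <;> simp [h])

-- projecting the matched pairs of one tier back to the items of that tier
theorem pairs_filter (pats : List String) (results : List (List (String × String))) (i : Nat) :
    ((results.filterMap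
        (fun item => (pvFindTier 0 pats ((PySem.Dict.mk item).getD "url" "")).map
          (fun idx => (Int.ofNat idx, item)))).filter
      (fun p => p.1 == (i : Int))).map (fun p => p.2)
    = results.filter
        (fun item => pvFindTier 0 pats ((PySem.Dict.mk item).getD "url" "") == some i) := by
  induction results with
  | nil => rfl
  | cons item rest ih =>
      simp only [Int.ofNat_eq_natCast] at ih ⊢
      cases h : pvFindTier 0 pats ((PySem.Dict.mk item).getD "url" "") with
      | some idx =>
          rw [List.filterMap_cons_some (b := (Int.ofNat idx, item)) (by rw [h]; rfl),
              List.filter_cons, List.filter_cons]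
          by_cases hij : idx = i
          · subst hij; simp [h, ih]
          · have hb : ((idx : Int) == (i : Int)) = false := by simp [hij]
            simp [h, hb, ih, hij]
      | none =>
          rw [List.filterMap_cons_none (by rw [h]; rfl), List.filter_cons]
          simp [h, ih]

-- A's inner loop expressed through B's key
theorem find_key (pats : List String) (it : List (String × String)) :
    pvFindTier 0 pats ((PySem.Dict.mk it).getD "url" "")
    = if pvKey pats it < pats.length then some (pvKey pats it) else none := by
  rw [pvFindTier_eq]; simp [pvKey]

-- B's port is the tier-bucket concatenation over range (len + 1)
theorem portB_eq (results : List (List (String × String))) (pats : List String) :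
    prioritize_urls_alt results pats
    = (List.range (pats.length + 1)).flatMap
        (fun i => results.filter (fun it => pvKey pats it == i)) := by
  exact sorted_eq_buckets (pvKey pats) pats.length results (fun x _ => pvTier_le _ _)

-- A's port is the same buckets, the unmatched tier written separately
theorem portA_eq (results : List (List (String × String))) (pats : List String) :
    prioritize_urls results pats
    = (List.range pats.length).flatMap (fun i => results.filter (fun it => pvKey pats it == i))
      ++ results.filter (fun it => pvKey pats it == pats.length) := by
  unfold prioritize_urls
  simp only [loop_split, foldl_cond_modify]
  rw [PySem.List.foldl_append_eq_flatMap, PySem.List.pyRange_zero_natCast, List.flatMap_map]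
  have hb : ∀ i ∈ List.range pats.length,
      ((results.filterMap
          (fun item => (pvFindTier 0 pats ((PySem.Dict.mk item).getD "url" "")).map
            (fun idx => (Int.ofNat idx, item)))).foldl
        (fun d p => d.modify p.1 [] (fun l => l ++ [p.2]))
        (((List.range pats.length).map (fun k => ((k : Nat) : Int))).foldl
          (fun d i => d.insert i []) PySem.Dict.empty)).getD ((i : Nat) : Int) []
      = results.filter (fun it => pvKey pats it == i) := by
    intro i hi
    have hin : i < pats.length := List.mem_range.1 hi
    rw [PySem.Dict.getD_foldl_modify_append,
        getD_init _ _ (fun c => PySem.Dict.getD_empty c []), pairs_filter]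
    simp only [List.nil_append]
    apply List.filter_congr
    intro it _
    rw [find_key]
    by_cases hk : pvKey pats it < pats.length
    · simp [hk]
    · have hle := pvTier_le pats (PySem.Str.lower ((PySem.Dict.mk it).getD "url" ""))
      have : pvKey pats it = pats.length := by unfold pvKey at *; omega
      simp [this]; omega
  rw [List.flatMap_congr hb]
  have hr : results.filter
      (fun item => (pvFindTier 0 pats ((PySem.Dict.mk item).getD "url" "")).isNone)
      = results.filter (fun it => pvKey pats it == pats.length) := by
    apply List.filter_congr
    intro it _
    rw [find_key]
    by_cases hk : pvKey pats it < pats.length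
    · simp [hk]; omega
    · have hle := pvTier_le pats (PySem.Str.lower ((PySem.Dict.mk it).getD "url" ""))
      have : pvKey pats it = pats.length := by unfold pvKey at *; omega
      simp [this]
  rw [hr]
  simp

-- the two ports agree
theorem ports_eq (results : List (List (String × String))) (pats : List String) :
    prioritize_urls results pats = prioritize_urls_alt results pats := by
  rw [portA_eq, portB_eq, List.range_succ, List.flatMap_append, List.flatMap_cons,
      List.flatMap_nil, List.append_nil]

-- ===== VERDICT (by name: the statement is the Claim_ definition above) =====
theorem prioritize_urls_spec : Claim_equal_prioritize_urls := by
  intro results priority_patterns _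
  exact ports_eq results priority_patterns
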